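-- pv_equiv track=rewrite | github.com/SaarShai/Primes-Equispaced | experiments/verify_identity.py | verify_permutation
-- ===== SOURCE A (Python) =====
-- from math import gcd
--
-- def verify_permutation(p, b):
--     """Step 4: Check if a -> (p*a mod b) is a permutation of coprime residues mod b."""
--     if gcd(p, b) != 1:
--         return False, "gcd(p,b) != 1"
--
--     coprimes = [a for a in range(1, b) if gcd(a, b) == 1]
--     mapped = [(p * a) % b for a in coprimes]
--     mapped_sorted = sorted(mapped)
--     coprimes_sorted = sorted(coprimes)
--
--     is_perm = mapped_sorted == coprimes_sorted
--     return is_perm, f"coprimes={coprimes}, mapped={mapped}"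
-- ===== SOURCE B (Python) =====
-- from math import gcd
--
-- def verify_permutation(p, b):
--     """Step 4: Check if a -> (p*a mod b) is a permutation of coprime residues mod b."""
--     if gcd(p, b) != 1:
--         return False, "gcd(p,b) != 1"
--
--     # distinct prime factors of b by trial division (computed once)
--     factors = []
--     n = b
--     d = 2
--     while d * d <= n:
--         if n % d == 0:
--             factors.append(d)
--             while n % d == 0:
--                 n //= d
--         d += 1
--     if n > 1:
--         factors.append(n)
--
--     coprimes = [a for a in range(1, b) if all(a % q != 0 for q in factors)]
--     mapped = [(p * a) % b for a in coprimes]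
--     mapped_sorted = sorted(mapped)
--     coprimes_sorted = sorted(coprimes)
--
--     is_perm = mapped_sorted == coprimes_sorted
--     return is_perm, f"coprimes={coprimes}, mapped={mapped}"
-- ===== Notes on version B (the rewrite author's own statement) =====
-- stated objective: alternative
-- what changed: B replaces the per-element Euclidean gcd test with a one-time trial-division factorization of b into its distinct prime factors and then filters range(1,b) by divisibility against that factor list; guard, mapping, sort-compare and message are unchanged.
import Mathlib
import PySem

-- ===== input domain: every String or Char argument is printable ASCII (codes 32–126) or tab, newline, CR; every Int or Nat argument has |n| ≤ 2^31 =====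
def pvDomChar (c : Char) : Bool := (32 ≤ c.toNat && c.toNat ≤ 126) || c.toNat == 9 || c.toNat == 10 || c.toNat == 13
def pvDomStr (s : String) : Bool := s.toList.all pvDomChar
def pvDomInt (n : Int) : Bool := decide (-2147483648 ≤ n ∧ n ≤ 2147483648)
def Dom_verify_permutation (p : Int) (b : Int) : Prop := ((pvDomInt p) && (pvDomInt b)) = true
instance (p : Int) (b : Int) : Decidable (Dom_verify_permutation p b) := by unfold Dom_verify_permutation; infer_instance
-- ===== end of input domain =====

-- B replaces the per-element gcd test by a one-time trial-division factorization of b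
-- followed by divisibility filtering (objective: alternative algorithm, same results).

-- ===== PORT A =====
-- f"...{coprimes}..." : Python's repr of a list of ints
def pyIntListRepr (xs : List Int) : String :=
  "[" ++ String.intercalate ", " (xs.map PySem.Int.toStr) ++ "]"

def verify_permutation (p : Int) (b : Int) : Bool × String :=
  if Int.gcd p b ≠ 1 then (false, "gcd(p,b) != 1")
  else
    let coprimes := (PySem.List.pyRange 1 b 1).filter (fun a => Int.gcd a b == 1)
    let mapped := coprimes.map (fun a => PySem.Int.mod (p * a) b)
    let mapped_sorted := PySem.List.sorted mapped (fun x => x) false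
    let coprimes_sorted := PySem.List.sorted coprimes (fun x => x) false
    let is_perm := mapped_sorted == coprimes_sorted
    (is_perm, "coprimes=" ++ pyIntListRepr coprimes ++ ", mapped=" ++ pyIntListRepr mapped)

-- ===== PORT B =====
-- a / b < a for 0 < a, 2 ≤ b (termination of the division loops)
theorem pv_ediv_lt (a b : Int) (ha : 0 < a) (hb : 2 ≤ b) : a / b < a := by
  rw [Int.ediv_lt_iff_lt_mul (by omega)]
  nlinarith

-- inner `while n % d == 0: n //= d` (the 2 ≤ d / 0 < n conjuncts only make the loop total;
-- at every call site they hold)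
def divOut (n : Int) (d : Int) : Int :=
  if h : 2 ≤ d ∧ 0 < n ∧ PySem.Int.mod n d = 0 then
    divOut (PySem.Int.floordiv n d) d
  else n
termination_by n.toNat
decreasing_by
  have h1 : PySem.Int.floordiv n d = n / d := PySem.Int.floordiv_eq_ediv_of_pos (by omega)
  have h2 : n / d < n := pv_ediv_lt n d h.2.1 h.1
  have h3 := h.2.1
  rw [h1]; omega

-- n ≤ itself under divOut (used for termination of the outer loop)
theorem divOut_le (n d : Int) (hn : 0 < n) : divOut n d ≤ n := by
  fun_induction divOut n d with
  | case1 n h ih =>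
    have h1 : PySem.Int.floordiv n d = n / d := PySem.Int.floordiv_eq_ediv_of_pos (by omega)
    have h2 : n / d < n := pv_ediv_lt n d h.2.1 h.1
    have h3 : 0 < n / d := by
      have hd : d ∣ n := (PySem.Int.mod_eq_zero_iff_dvd n d).mp h.2.2
      have hle := Int.le_of_dvd h.2.1 hd
      have := (Int.le_ediv_iff_mul_le (a := 1) (b := n) (c := d) (by omega)).mpr (by omega)
      omega
    have := ih (by rw [h1]; exact h3)
    rw [h1] at this ⊢; omega
  | case2 n h => exact le_refl n

-- outer trial-division loop: returns (collected factors, remaining cofactor)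
def factorLoop (n : Int) (d : Int) (fs : List Int) : List Int × Int :=
  if h : 2 ≤ d ∧ d * d ≤ n then
    if PySem.Int.mod n d = 0 then
      factorLoop (divOut n d) (d + 1) (fs ++ [d])
    else
      factorLoop n (d + 1) fs
  else (fs, n)
termination_by (n - d).toNat
decreasing_by
  · have hn : 0 < n := by nlinarith [h.1, h.2]
    have h2d : 2 * d ≤ d * d := by nlinarith [h.1]
    have := divOut_le n d hn
    omega
  · have h2d : 2 * d ≤ d * d := by nlinarith [h.1]
    omega

def verify_permutation_alt (p : Int) (b : Int) : Bool × String :=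
  if Int.gcd p b ≠ 1 then (false, "gcd(p,b) != 1")
  else
    let r := factorLoop b 2 []
    let factors := if r.2 > 1 then r.1 ++ [r.2] else r.1
    let coprimes := (PySem.List.pyRange 1 b 1).filter
      (fun a => factors.all (fun q => !(PySem.Int.mod a q == 0)))
    let mapped := coprimes.map (fun a => PySem.Int.mod (p * a) b)
    let mapped_sorted := PySem.List.sorted mapped (fun x => x) false
    let coprimes_sorted := PySem.List.sorted coprimes (fun x => x) false
    let is_perm := mapped_sorted == coprimes_sorted
    (is_perm, "coprimes=" ++ pyIntListRepr coprimes ++ ", mapped=" ++ pyIntListRepr mapped)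

-- ===== PRECONDITION & SPEC =====
def Spec_verify_permutation (p : Int) (b : Int) (out : Bool × String) : Prop := out = verify_permutation_alt p b
instance (p : Int) (b : Int) (out : Bool × String) : Decidable (Spec_verify_permutation p b out) := by unfold Spec_verify_permutation; infer_instance

-- ===== CLAIM (what is proved, stated in full; the proofs are below) =====
def Claim_equal_verify_permutation : Prop := ∀ (p : Int) (b : Int), Dom_verify_permutation p b → Spec_verify_permutation p b (verify_permutation p b)

-- ===== LEMMAS AND PROOFS =====

theorem divOut_pos (n d : Int) : 0 < n → 0 < divOut n d := by
  fun_induction divOut n d with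
  | case1 n h ih =>
    intro hn
    have h1 : PySem.Int.floordiv n d = n / d := PySem.Int.floordiv_eq_ediv_of_pos (by omega)
    have hdn : d ∣ n := (PySem.Int.mod_eq_zero_iff_dvd n d).mp h.2.2
    have hle := Int.le_of_dvd h.2.1 hdn
    have h3 : 0 < n / d := (Int.le_ediv_iff_mul_le (by omega : (0:Int) < d)).mpr (by omega)
    exact ih (by rw [h1]; exact h3)
  | case2 n h => exact fun hn => hn

theorem divOut_dvd (n d : Int) : 0 < n → divOut n d ∣ n := by
  fun_induction divOut n d with
  | case1 n h ih =>
    intro hn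
    have h1 : PySem.Int.floordiv n d = n / d := PySem.Int.floordiv_eq_ediv_of_pos (by omega)
    have hdn : d ∣ n := (PySem.Int.mod_eq_zero_iff_dvd n d).mp h.2.2
    have hle := Int.le_of_dvd h.2.1 hdn
    have h3 : 0 < n / d := (Int.le_ediv_iff_mul_le (by omega : (0:Int) < d)).mpr (by omega)
    have hrec := ih (by rw [h1]; exact h3)
    have hdiv : n / d ∣ n := ⟨d, (Int.ediv_mul_cancel hdn).symm⟩
    rw [h1] at hrec ⊢
    exact dvd_trans hrec hdiv
  | case2 n h => exact fun _ => dvd_rfl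

theorem divOut_not_dvd (n d : Int) (hd : 2 ≤ d) : 0 < n → ¬ d ∣ divOut n d := by
  fun_induction divOut n d with
  | case1 n h ih =>
    intro hn
    have h1 : PySem.Int.floordiv n d = n / d := PySem.Int.floordiv_eq_ediv_of_pos (by omega)
    have hdn : d ∣ n := (PySem.Int.mod_eq_zero_iff_dvd n d).mp h.2.2
    have hle := Int.le_of_dvd h.2.1 hdn
    have h3 : 0 < n / d := (Int.le_ediv_iff_mul_le (by omega : (0:Int) < d)).mpr (by omega)
    exact ih (by rw [h1]; exact h3)
  | case2 n h =>
    intro hn hdvd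
    exact h ⟨hd, hn, (PySem.Int.mod_eq_zero_iff_dvd n d).mpr hdvd⟩

theorem divOut_prime_dvd (n d q : Int) (hq : Prime q) : 0 < n → q ∣ n → q ∣ divOut n d ∨ q ∣ d := by
  fun_induction divOut n d with
  | case1 n h ih =>
    intro hn hqn
    have h1 : PySem.Int.floordiv n d = n / d := PySem.Int.floordiv_eq_ediv_of_pos (by omega)
    have hdn : d ∣ n := (PySem.Int.mod_eq_zero_iff_dvd n d).mp h.2.2
    have hle := Int.le_of_dvd h.2.1 hdn
    have h3 : 0 < n / d := (Int.le_ediv_iff_mul_le (by omega : (0:Int) < d)).mpr (by omega)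
    have hsplit : q ∣ d ∨ q ∣ n / d := hq.2.2 d (n / d) (by rwa [Int.mul_ediv_cancel' hdn])
    rcases hsplit with hqd | hqnd
    · exact Or.inr hqd
    · exact ih (by rw [h1]; exact h3) (by rw [h1]; exact hqnd)
  | case2 n h => exact fun _ hqn => Or.inl hqn

theorem factorLoop_char (b : Int) (n d : Int) (fs : List Int) :
    2 ≤ d → 0 < n → n ∣ b →
    (∀ f ∈ fs, 2 ≤ f ∧ f ∣ b) →
    (∀ e : Int, 2 ≤ e → e < d → ¬ e ∣ n) →
    (∀ q : Int, Prime q → 0 < q → q ∣ b → q ∈ fs ∨ q ∣ n) →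
    (∀ f ∈ (if (factorLoop n d fs).2 > 1 then (factorLoop n d fs).1 ++ [(factorLoop n d fs).2] else (factorLoop n d fs).1), 2 ≤ f ∧ f ∣ b) ∧
    (∀ q : Int, Prime q → 0 < q → q ∣ b →
      q ∈ (if (factorLoop n d fs).2 > 1 then (factorLoop n d fs).1 ++ [(factorLoop n d fs).2] else (factorLoop n d fs).1)) := by
  fun_induction factorLoop n d fs with
  | case1 n d fs h hmod ih =>
    intro hd hn hnb hfs hmin hcov
    have hdn : d ∣ n := (PySem.Int.mod_eq_zero_iff_dvd n d).mp hmod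
    apply ih (by omega) (divOut_pos n d hn) (dvd_trans (divOut_dvd n d hn) hnb)
    · intro f hf
      rcases List.mem_append.mp hf with hf | hf
      · exact hfs f hf
      · rw [List.mem_singleton] at hf
        exact hf ▸ ⟨hd, dvd_trans hdn hnb⟩
    · intro e he2 hed hedvd
      rcases lt_or_eq_of_le (by omega : e ≤ d) with hlt | heq
      · exact hmin e he2 hlt (dvd_trans hedvd (divOut_dvd n d hn))
      · exact divOut_not_dvd n d hd hn (heq ▸ hedvd)
    · intro q hq hq0 hqb
      rcases hcov q hq hq0 hqb with hin | hqn
      · exact Or.inl (List.mem_append.mpr (Or.inl hin))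
      · rcases divOut_prime_dvd n d q hq hn hqn with hqo | hqd
        · exact Or.inr hqo
        · have hq2 : 2 ≤ q := by have := hq.ne_one; omega
          have hqled : q ≤ d := Int.le_of_dvd (by omega) hqd
          rcases lt_or_eq_of_le hqled with hlt | heq
          · exact absurd hqn (hmin q hq2 hlt)
          · exact Or.inl (List.mem_append.mpr (Or.inr (List.mem_singleton.mpr heq)))
  | case2 n d fs h hmod ih =>
    intro hd hn hnb hfs hmin hcov
    apply ih (by omega) hn hnb hfs _ hcov
    intro e he2 hed hedvd
    rcases lt_or_eq_of_le (by omega : e ≤ d) with hlt | heq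
    · exact hmin e he2 hlt hedvd
    · exact hmod ((PySem.Int.mod_eq_zero_iff_dvd n d).mpr (heq ▸ hedvd))
  | case3 n d fs h =>
    intro hd hn hnb hfs hmin hcov
    have hnd2 : n < d * d := by
      by_contra hc
      exact h ⟨hd, by omega⟩
    constructor
    · intro f hf
      by_cases hn1 : (fs, n).2 > 1 <;> simp only [hn1, if_true, if_false] at hf
      · rcases List.mem_append.mp hf with hf | hf
        · exact hfs f hf
        · rw [List.mem_singleton] at hf
          exact hf ▸ ⟨by simp at hn1; omega, hnb⟩
      · exact hfs f hf
    · intro q hq hq0 hqb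
      have hq2 : 2 ≤ q := by have := hq.ne_one; omega
      rcases hcov q hq hq0 hqb with hin | hqn
      · by_cases hn1 : (fs, n).2 > 1 <;> simp only [hn1, if_true, if_false]
        · exact List.mem_append.mpr (Or.inl hin)
        · exact hin
      · have hqlen : q ≤ n := Int.le_of_dvd hn hqn
        have hqged : d ≤ q := by
          by_contra hc
          exact hmin q hq2 (by omega) hqn
        obtain ⟨c, hc⟩ := hqn
        have hc0 : 0 < c := by nlinarith
        have hcn : c ∣ n := ⟨q, by rw [hc]; ring⟩
        have hc1 : c = 1 := by
          by_contra hcne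
          have hcged : d ≤ c := by
            by_contra hcc
            exact hmin c (by omega) (by omega) hcn
          nlinarith
        have hqn' : q = n := by rw [hc1, mul_one] at hc; omega
        have hn1 : (fs, n).2 > 1 := by simp only; omega
        simp only [hn1, if_true]
        exact List.mem_append.mpr (Or.inr (List.mem_singleton.mpr hqn'))

theorem coprime_pointwise (b a : Int) (hb : 2 ≤ b) :
    (Int.gcd a b == 1) =
      ((if (factorLoop b 2 []).2 > 1 then (factorLoop b 2 []).1 ++ [(factorLoop b 2 []).2] else (factorLoop b 2 []).1).all
        (fun q => !(PySem.Int.mod a q == 0))) := by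
  obtain ⟨hC1, hC2⟩ :=
    factorLoop_char b b 2 [] (le_refl 2) (by omega) dvd_rfl
      (by intro f hf; simp at hf)
      (by intro e he2 hed; omega)
      (fun q _ _ hqb => Or.inr hqb)
  rw [← Bool.coe_iff_coe]
  simp only [beq_iff_eq, List.all_eq_true, Bool.not_eq_eq_eq_not, Bool.not_true,
    beq_eq_false_iff_ne, ne_eq, PySem.Int.mod_eq_zero_iff_dvd]
  constructor
  · intro h1 q hqF hdvd
    obtain ⟨hq2, hqb⟩ := hC1 q hqF
    have hq1 : q ∣ (1 : Int) := by
      have := Int.dvd_coe_gcd hdvd hqb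
      rwa [h1, Int.natCast_one] at this
    have := Int.le_of_dvd (by omega) hq1
    omega
  · intro hall
    by_contra hne
    obtain ⟨qn, hqp, hqd⟩ := Nat.exists_prime_and_dvd hne
    have hq : Prime ((qn : Nat) : Int) := Nat.prime_iff_prime_int.mp hqp
    have hqa : ((qn : Nat) : Int) ∣ a :=
      dvd_trans (Int.natCast_dvd_natCast.mpr hqd) (Int.gcd_dvd_left a b)
    have hqb : ((qn : Nat) : Int) ∣ b :=
      dvd_trans (Int.natCast_dvd_natCast.mpr hqd) (Int.gcd_dvd_right a b)
    have hq0 : (0 : Int) < (qn : Nat) := by exact_mod_cast hqp.pos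
    exact hall _ (hC2 _ hq hq0 hqb) hqa

theorem filters_eq (b : Int) :
    (PySem.List.pyRange 1 b 1).filter (fun a => Int.gcd a b == 1) =
    (PySem.List.pyRange 1 b 1).filter
      (fun a => (if (factorLoop b 2 []).2 > 1 then (factorLoop b 2 []).1 ++ [(factorLoop b 2 []).2] else (factorLoop b 2 []).1).all
        (fun q => !(PySem.Int.mod a q == 0))) := by
  apply List.filter_congr
  intro a ha
  have hmem := (PySem.List.mem_pyRange_one).mp ha
  exact coprime_pointwise b a (by omega)

-- ===== VERDICT (by name: the statement is the Claim_ definition above) =====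
theorem verify_permutation_spec : Claim_equal_verify_permutation := by
  intro p b _
  unfold Spec_verify_permutation verify_permutation verify_permutation_alt
  split_ifs with h
  · rfl
  · rw [filters_eq b]
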